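-- pv_equiv track=rewrite | github.com/Rin204/Library-Python | expansion/$tests/convolution/or_convolution_global.test.py | or_convolution_global_mod
-- ===== SOURCE A (Python) =====
-- MOD = 998244353
--
-- def or_convolution_global_mod(A, B):
--     n = max(len(A), len(B))
--     l = (n - 1).bit_length()
--     n = 1 << l
--     A += [0] * (n - len(A))
--     B += [0] * (n - len(B))
--
--     def f(A):
--         for i in range(l):
--             for bit in range(n):
--                 if bit >> i & 1:
--                     A[bit] += A[bit ^ (1 << i)]
--                     A[bit] %= MOD
--
--     def invf(A):
--         for i in range(l):
--             for bit in range(n):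
--                 if bit >> i & 1:
--                     A[bit] -= A[bit ^ (1 << i)]
--                     A[bit] %= MOD
--
--     f(A)
--     f(B)
--     C = [a * b % MOD for a, b in zip(A, B)]
--     invf(C)
--     return C
-- ===== SOURCE B (Python) =====
-- MOD = 998244353
--
--
-- def or_convolution_global_mod(A, B):
--     # Recursive divide-and-conquer zeta/Moebius transforms instead of the
--     # iterative bit loops; mutates A and B (padding + forward transform)
--     # exactly like the original.
--     n = max(len(A), len(B))
--     l = (n - 1).bit_length()
--     n = 1 << l
--     A += [0] * (n - len(A))
--     B += [0] * (n - len(B))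
--
--     def zeta(xs):
--         if len(xs) <= 1:
--             return xs
--         h = len(xs) // 2
--         lo = zeta(xs[:h])
--         hi = zeta(xs[h:])
--         return lo + [(y + x) % MOD for x, y in zip(lo, hi)]
--
--     def moebius(xs):
--         if len(xs) <= 1:
--             return xs
--         h = len(xs) // 2
--         lo = moebius(xs[:h])
--         hi = moebius(xs[h:])
--         return lo + [(y - x) % MOD for x, y in zip(lo, hi)]
--
--     A[:] = zeta(A)
--     B[:] = zeta(B)
--     C = [a * b % MOD for a, b in zip(A, B)]
--     return moebius(C)
-- ===== Notes on version B (the rewrite author's own statement) =====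
-- stated objective: alternative
-- what changed: The iterative per-bit zeta/Moebius transform loops (for i in range(l): for bit in range(n)) are replaced by recursive divide-and-conquer transforms that split the array into halves, recurse, and combine the halves with one zip; A and B are still padded and mutated in place the same way.
import Mathlib
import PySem

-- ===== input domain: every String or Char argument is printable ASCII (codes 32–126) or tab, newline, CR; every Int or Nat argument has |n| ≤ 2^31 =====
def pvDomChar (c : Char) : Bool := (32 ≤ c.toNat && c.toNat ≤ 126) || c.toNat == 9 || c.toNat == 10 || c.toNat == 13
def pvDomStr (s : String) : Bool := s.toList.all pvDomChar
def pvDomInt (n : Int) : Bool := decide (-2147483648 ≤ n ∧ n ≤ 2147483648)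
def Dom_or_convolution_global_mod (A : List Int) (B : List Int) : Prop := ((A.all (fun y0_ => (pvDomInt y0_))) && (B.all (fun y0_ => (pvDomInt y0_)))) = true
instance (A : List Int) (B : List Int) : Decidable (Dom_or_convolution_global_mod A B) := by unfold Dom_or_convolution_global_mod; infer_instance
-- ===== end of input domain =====

-- B replaces the iterative per-bit zeta/Moebius bit loops by recursive
-- divide-and-conquer transforms on halves (same values, different decomposition).
-- Python A and Python B both mutate the argument lists (padding + forward
-- transform); the Lean equivalence is about the return value.

def pvMOD : Int := 998244353

-- ===== PORT A =====
-- inner body of the `for bit` loop of f/invf: `op` is (+) for f, (-) for invf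
-- (Python: A[bit] op= A[bit ^ (1 << i)]; A[bit] %= MOD).  Indices produced by
-- `range` are always in range, so getD/set are exact.
def pvStep (op : Int → Int → Int) (i : Nat) (acc : List Int) (bit : Nat) : List Int :=
  if (bit >>> i) &&& 1 = 1 then
    acc.set bit (op (acc.getD bit 0) (acc.getD (bit ^^^ (1 <<< i)) 0) % pvMOD)
  else acc

-- `for bit in range(n): …`
def pvPass (op : Int → Int → Int) (i n : Nat) (A : List Int) : List Int :=
  (List.range n).foldl (pvStep op i) A

-- `for i in range(l): …`  (the whole of f / invf)
def pvTransform (op : Int → Int → Int) (l n : Nat) (A : List Int) : List Int :=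
  (List.range l).foldl (fun acc i => pvPass op i n acc) A

def or_convolution_global_mod (A : List Int) (B : List Int) : List Int :=
  let n0 := max A.length B.length
  -- (n0 - 1).bit_length(): Python gives 1 for n0 = 0 (bit_length of -1), else Nat.size (n0-1); exact
  let l := if n0 = 0 then 1 else Nat.size (n0 - 1)
  let n := 1 <<< l
  let A' := A ++ List.replicate (n - A.length) 0
  let B' := B ++ List.replicate (n - B.length) 0
  let Af := pvTransform (· + ·) l n A'
  let Bf := pvTransform (· + ·) l n B'
  let C := List.zipWith (fun a b => a * b % pvMOD) Af Bf
  pvTransform (· - ·) l n C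

-- ===== PORT B =====
-- recursive divide-and-conquer transform of Source B: `op` is (+) for zeta, (-) for moebius
def pvRec (op : Int → Int → Int) (xs : List Int) : List Int :=
  if xs.length ≤ 1 then xs
  else
    let h := xs.length / 2
    let lo := pvRec op (xs.take h)
    let hi := pvRec op (xs.drop h)
    lo ++ List.zipWith (fun x y => op y x % pvMOD) lo hi
termination_by xs.length
decreasing_by
  · simp only [List.length_take]; omega
  · simp only [List.length_drop]; omega

def or_convolution_global_mod_alt (A : List Int) (B : List Int) : List Int :=
  let n0 := max A.length B.length
  let l := if n0 = 0 then 1 else Nat.size (n0 - 1)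
  let n := 1 <<< l
  let A' := A ++ List.replicate (n - A.length) 0
  let B' := B ++ List.replicate (n - B.length) 0
  let Af := pvRec (· + ·) A'
  let Bf := pvRec (· + ·) B'
  let C := List.zipWith (fun a b => a * b % pvMOD) Af Bf
  pvRec (· - ·) C

-- ===== PRECONDITION & SPEC =====
def Spec_or_convolution_global_mod (A : List Int) (B : List Int) (out : List Int) : Prop := out = or_convolution_global_mod_alt A B
instance (A : List Int) (B : List Int) (out : List Int) : Decidable (Spec_or_convolution_global_mod A B out) := by unfold Spec_or_convolution_global_mod; infer_instance

-- ===== CLAIM (what is proved, stated in full; the proofs are below) =====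
def Claim_equal_or_convolution_global_mod : Prop := ∀ (A : List Int) (B : List Int), Dom_or_convolution_global_mod A B → Spec_or_convolution_global_mod A B (or_convolution_global_mod A B)

-- ===== LEMMAS AND PROOFS =====

theorem pvStep_length (op : Int → Int → Int) (i : Nat) (acc : List Int) (bit : Nat) :
    (pvStep op i acc bit).length = acc.length := by
  unfold pvStep; split <;> simp

theorem pvPass_length (op : Int → Int → Int) (i n : Nat) (A : List Int) :
    (pvPass op i n A).length = A.length := by
  unfold pvPass
  induction n with
  | zero => simp
  | succ k ih => rw [List.range_succ, List.foldl_append]; simp [pvStep_length, ih]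

theorem getD_set (A : List Int) (m j : Nat) (v : Int) :
    (A.set m v).getD j 0 = if j = m ∧ m < A.length then v else A.getD j 0 := by
  simp only [List.getD_eq_getElem?_getD, List.getElem?_set]
  split_ifs with h1 h2 h3 <;> simp_all

theorem getD_append_left (lo hi : List Int) (j : Nat) (h : j < lo.length) :
    (lo ++ hi).getD j 0 = lo.getD j 0 := by
  simp only [List.getD_eq_getElem?_getD, List.getElem?_append_left h]

theorem getD_append_right (lo hi : List Int) (j : Nat) (h : lo.length ≤ j) :
    (lo ++ hi).getD j 0 = hi.getD (j - lo.length) 0 := by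
  simp only [List.getD_eq_getElem?_getD, List.getElem?_append_right h]

theorem getD_zipWith (f : Int → Int → Int) (xs ys : List Int) (j : Nat)
    (hx : j < xs.length) (hy : j < ys.length) :
    (List.zipWith f xs ys).getD j 0 = f (xs.getD j 0) (ys.getD j 0) := by
  rw [List.getD_eq_getElem _ _ (by simp; omega), List.getD_eq_getElem _ _ hx, List.getD_eq_getElem _ _ hy]
  simp

theorem ext_getD {A B : List Int} (hlen : A.length = B.length)
    (h : ∀ j, j < A.length → A.getD j 0 = B.getD j 0) : A = B := by
  apply List.ext_getElem hlen
  intro j h1 h2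
  have := h j h1
  rwa [List.getD_eq_getElem _ _ h1, List.getD_eq_getElem _ _ h2] at this

theorem bitcond_iff (j i : Nat) : ((j >>> i) &&& 1 = 1) ↔ j.testBit i = true := by
  simp [Nat.testBit, Nat.and_one_is_mod, Nat.shiftRight_eq_div_pow]

theorem testBit_xor_pow (j i : Nat) : (j ^^^ (1 <<< i)).testBit i = ! j.testBit i := by
  simp [Nat.testBit_xor, Nat.shiftLeft_eq]

theorem xor_lt {l i j : Nat} (hj : j < 2 ^ l) (hi : i < l) : j ^^^ (1 <<< i) < 2 ^ l := by
  have : (1 <<< i) < 2 ^ l := by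
    rw [Nat.shiftLeft_eq, one_mul]; exact Nat.pow_lt_pow_right one_lt_two hi
  exact Nat.xor_lt_two_pow hj this

theorem testBit_div_mod (x i : Nat) : x.testBit i = decide (x / 2 ^ i % 2 = 1) := by
  rw [Nat.testBit, Nat.one_and_eq_mod_two, Nat.shiftRight_eq_div_pow]
  rcases Nat.mod_two_eq_zero_or_one (x / 2 ^ i) with h | h <;> simp [h]

theorem testBit_pow_add {l j : Nat} (hj : j < 2 ^ l) (k : Nat) :
    (2 ^ l + j).testBit k = ((k == l) || j.testBit k) := by
  rcases lt_trichotomy k l with h | h | h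
  · simp only [testBit_div_mod]
    have hdvd : 2 ^ l = 2 ^ k * 2 ^ (l - k) := by rw [← pow_add]; congr 1; omega
    rw [hdvd, Nat.mul_add_div (Nat.two_pow_pos k)]
    have he : 2 ^ (l - k) = 2 * 2 ^ (l - k - 1) := by rw [← pow_succ']; congr 1; omega
    have hne : k ≠ l := by omega
    have hb : (k == l) = false := by simp [hne]
    rw [hb, Bool.false_or, he, Nat.mul_add_mod]
  · subst h
    have h1 : (2 ^ k + j) / 2 ^ k = 1 := by
      have := Nat.mul_add_div (Nat.two_pow_pos k) 1 j
      rw [mul_one] at this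
      rw [this, Nat.div_eq_of_lt hj]
    simp [testBit_div_mod, h1]
  · have h1 : (2 ^ l + j).testBit k = false :=
      Nat.testBit_eq_false_of_lt (by
        have : 2 ^ l + j < 2 ^ (l + 1) := by rw [pow_succ]; omega
        exact lt_of_lt_of_le this (Nat.pow_le_pow_right (by norm_num) h))
    have h2 : j.testBit k = false :=
      Nat.testBit_eq_false_of_lt (lt_of_lt_of_le hj (Nat.pow_le_pow_right (by norm_num) (le_of_lt h)))
    have hne : k ≠ l := by omega
    simp [h1, h2, hne]

theorem xor_pow_add {l i j : Nat} (hj : j < 2 ^ l) (hi : i < l) :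
    (2 ^ l + j) ^^^ (1 <<< i) = 2 ^ l + (j ^^^ (1 <<< i)) := by
  have hx : j ^^^ (1 <<< i) < 2 ^ l := by
    have : (1 <<< i) < 2 ^ l := by
      rw [Nat.shiftLeft_eq, one_mul]; exact Nat.pow_lt_pow_right one_lt_two hi
    exact Nat.xor_lt_two_pow hj this
  apply Nat.eq_of_testBit_eq
  intro k
  rw [Nat.testBit_xor, testBit_pow_add hj, testBit_pow_add hx, Nat.testBit_xor]
  rcases eq_or_ne k l with rfl | hne
  · have : (1 <<< i).testBit k = false := by
      rw [Nat.shiftLeft_eq, one_mul, Nat.testBit_two_pow]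
      simp; omega
    simp [this]
  · have hb : (k == l) = false := by simp [hne]
    simp [hb]


theorem pvStep_apply (op : Int → Int → Int) (i : Nat) (acc : List Int) (bit : Nat) :
    pvStep op i acc bit =
      if (bit >>> i) &&& 1 = 1 then
        acc.set bit (op (acc.getD bit 0) (acc.getD (bit ^^^ (1 <<< i)) 0) % pvMOD)
      else acc := rfl

theorem passUpto_length (op : Int → Int → Int) (i : Nat) (A : List Int) (k : Nat) :
    ((List.range k).foldl (pvStep op i) A).length = A.length := by
  induction k with
  | zero => simp
  | succ m ih => rw [List.range_succ, List.foldl_append]; simp [List.foldl, pvStep_length, ih]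

-- pointwise characterization of a partial pass (first k steps of `for bit in range(n)`)
theorem pass_getD (op : Int → Int → Int) (i : Nat) (A : List Int) (k : Nat)
    (hk : k ≤ A.length) (j : Nat) :
    ((List.range k).foldl (pvStep op i) A).getD j 0 =
      if j < k ∧ j.testBit i then op (A.getD j 0) (A.getD (j ^^^ (1 <<< i)) 0) % pvMOD
      else A.getD j 0 := by
  revert hk
  induction k generalizing j with
  | zero => intro hk; simp
  | succ m ih =>
    intro hk
    have hm : m ≤ A.length := by omega
    rw [List.range_succ, List.foldl_append]
    simp only [List.foldl]
    rw [pvStep_apply]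
    by_cases hc : (m >>> i) &&& 1 = 1
    · have htb : m.testBit i = true := (bitcond_iff m i).mp hc
      rw [if_pos hc, getD_set]
      have hpm : ((List.range m).foldl (pvStep op i) A).getD m 0 = A.getD m 0 := by
        rw [ih m hm]; simp
      have hpp : ((List.range m).foldl (pvStep op i) A).getD (m ^^^ (1 <<< i)) 0
          = A.getD (m ^^^ (1 <<< i)) 0 := by
        rw [ih (m ^^^ (1 <<< i)) hm]
        have : (m ^^^ (1 <<< i)).testBit i = false := by rw [testBit_xor_pow, htb]; rfl
        simp [this]
      rw [hpm, hpp, passUpto_length]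
      by_cases hj : j = m
      · subst hj
        simp [htb, Nat.lt_of_lt_of_le (Nat.lt_succ_self j) hk]
      · rw [if_neg (by tauto), ih j hm]
        have : (j < m + 1 ∧ j.testBit i) ↔ (j < m ∧ j.testBit i) := by
          constructor <;> intro ⟨h1, h2⟩ <;> exact ⟨by omega, h2⟩
        by_cases hcnd : j < m ∧ j.testBit i
        · rw [if_pos hcnd, if_pos (this.mpr hcnd)]
        · rw [if_neg hcnd, if_neg (fun hh => hcnd (this.mp hh))]
    · have htb : m.testBit i = false := by
        rcases Bool.eq_false_or_eq_true (m.testBit i) with h | h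
        · exact absurd ((bitcond_iff m i).mpr h) hc
        · exact h
      rw [if_neg hc, ih j hm]
      by_cases hj : j = m
      · subst hj; simp [htb]
      · have : (j < m + 1 ∧ j.testBit i) ↔ (j < m ∧ j.testBit i) := by
          constructor <;> intro ⟨h1, h2⟩ <;> exact ⟨by omega, h2⟩
        by_cases hcnd : j < m ∧ j.testBit i
        · rw [if_pos hcnd, if_pos (this.mpr hcnd)]
        · rw [if_neg hcnd, if_neg (fun hh => hcnd (this.mp hh))]

theorem pow_succ_two (l : Nat) : 2 ^ (l + 1) = 2 ^ l + 2 ^ l := by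
  rw [pow_succ]; omega

-- a pass for a low bit acts on the two halves independently
theorem pvPass_getD (op : Int → Int → Int) (i n : Nat) (A : List Int)
    (hn : n ≤ A.length) (j : Nat) :
    (pvPass op i n A).getD j 0 =
      if j < n ∧ j.testBit i then op (A.getD j 0) (A.getD (j ^^^ (1 <<< i)) 0) % pvMOD
      else A.getD j 0 :=
  pass_getD op i A n hn j

theorem pass_split (op : Int → Int → Int) {l i : Nat} (hi : i < l) (lo hi' : List Int)
    (hlo : lo.length = 2 ^ l) (hhi : hi'.length = 2 ^ l) :
    pvPass op i (2 ^ (l + 1)) (lo ++ hi') =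
      pvPass op i (2 ^ l) lo ++ pvPass op i (2 ^ l) hi' := by
  have hlen : (lo ++ hi').length = 2 ^ (l + 1) := by
    simp [hlo, hhi, pow_succ_two]
  apply ext_getD
  · simp [pvPass, passUpto_length, hlo, hhi]
  intro j hj
  rw [pvPass_length, hlen] at hj
  rw [pvPass_getD op i _ _ (le_of_eq hlen.symm) j]
  by_cases hjlo : j < 2 ^ l
  · have hRa : (pvPass op i (2 ^ l) lo ++ pvPass op i (2 ^ l) hi').getD j 0
        = (pvPass op i (2 ^ l) lo).getD j 0 :=
      getD_append_left _ _ _ (by rw [pvPass_length, hlo]; exact hjlo)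
    rw [hRa, pvPass_getD op i _ _ (le_of_eq hlo.symm) j]
    have h1 : (lo ++ hi').getD j 0 = lo.getD j 0 := getD_append_left _ _ _ (by omega)
    have h2 : (lo ++ hi').getD (j ^^^ (1 <<< i)) 0 = lo.getD (j ^^^ (1 <<< i)) 0 :=
      getD_append_left _ _ _ (by rw [hlo]; exact xor_lt hjlo hi)
    rw [h1, h2]
    by_cases hcnd : j.testBit i
    · rw [if_pos ⟨hj, hcnd⟩, if_pos ⟨hjlo, hcnd⟩]
    · rw [if_neg (by tauto), if_neg (by tauto)]
  · have hj'lt : j - 2 ^ l < 2 ^ l := by rw [pow_succ_two] at hj; omega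
    have hjeq : j = 2 ^ l + (j - 2 ^ l) := by omega
    have hRa : (pvPass op i (2 ^ l) lo ++ pvPass op i (2 ^ l) hi').getD j 0
        = (pvPass op i (2 ^ l) hi').getD (j - (pvPass op i (2 ^ l) lo).length) 0 :=
      getD_append_right _ _ _ (by rw [pvPass_length, hlo]; omega)
    rw [hRa, pvPass_length, hlo, pvPass_getD op i _ _ (le_of_eq hhi.symm)]
    have htb : j.testBit i = (j - 2 ^ l).testBit i := by
      conv_lhs => rw [hjeq]
      rw [testBit_pow_add hj'lt]
      have hil : (i == l) = false := by simp; omega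
      rw [hil, Bool.false_or]
    have h1 : (lo ++ hi').getD j 0 = hi'.getD (j - 2 ^ l) 0 := by
      rw [getD_append_right _ _ _ (by omega), hlo]
    have h2 : (lo ++ hi').getD (j ^^^ (1 <<< i)) 0 = hi'.getD ((j - 2 ^ l) ^^^ (1 <<< i)) 0 := by
      conv_lhs => rw [hjeq, xor_pow_add hj'lt hi]
      rw [getD_append_right _ _ _ (by rw [hlo]; omega), hlo, Nat.add_sub_cancel_left]
    rw [h1, h2, htb]
    by_cases hcnd : (j - 2 ^ l).testBit i
    · rw [if_pos ⟨hj, hcnd⟩, if_pos ⟨hj'lt, hcnd⟩]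
    · rw [if_neg (by tauto), if_neg (by tauto)]

theorem xor_pow_cancel {l j : Nat} (hj : j < 2 ^ l) : (2 ^ l + j) ^^^ (1 <<< l) = j := by
  apply Nat.eq_of_testBit_eq
  intro k
  rw [Nat.testBit_xor, testBit_pow_add hj, Nat.shiftLeft_eq, one_mul, Nat.testBit_two_pow]
  rcases eq_or_ne k l with rfl | hne
  · simp
    exact Nat.testBit_eq_false_of_lt hj
  · have h1 : (k == l) = false := by simp [hne]
    have h2 : decide (l = k) = false := by simp; omega
    rw [h1, h2, Bool.false_or, Bool.xor_false]

-- the top-bit pass is the divide-and-conquer combine step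
theorem pass_top (op : Int → Int → Int) {l : Nat} (lo hi' : List Int)
    (hlo : lo.length = 2 ^ l) (hhi : hi'.length = 2 ^ l) :
    pvPass op l (2 ^ (l + 1)) (lo ++ hi') =
      lo ++ List.zipWith (fun x y => op y x % pvMOD) lo hi' := by
  have hlen : (lo ++ hi').length = 2 ^ (l + 1) := by simp [hlo, hhi, pow_succ_two]
  have hzip : (List.zipWith (fun x y => op y x % pvMOD) lo hi').length = 2 ^ l := by
    simp [hlo, hhi]
  apply ext_getD
  · simp [pvPass, passUpto_length, hlo, hhi, pow_succ_two]
  intro j hj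
  rw [pvPass_length, hlen] at hj
  rw [pvPass_getD op l _ _ (le_of_eq hlen.symm) j]
  by_cases hjlo : j < 2 ^ l
  · have htb : j.testBit l = false := Nat.testBit_eq_false_of_lt hjlo
    rw [if_neg (by simp [htb]),
      getD_append_left _ _ _ (by omega),
      getD_append_left _ _ _ (by omega)]
  · have hj'lt : j - 2 ^ l < 2 ^ l := by rw [pow_succ_two] at hj; omega
    have hjeq : j = 2 ^ l + (j - 2 ^ l) := by omega
    have htb : j.testBit l = true := by
      rw [hjeq, testBit_pow_add hj'lt]; simp
    rw [if_pos ⟨hj, htb⟩]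
    have h1 : (lo ++ hi').getD j 0 = hi'.getD (j - 2 ^ l) 0 := by
      rw [getD_append_right _ _ _ (by omega), hlo]
    have h2 : (lo ++ hi').getD (j ^^^ (1 <<< l)) 0 = lo.getD (j - 2 ^ l) 0 := by
      conv_lhs => rw [hjeq, xor_pow_cancel hj'lt]
      exact getD_append_left _ _ _ (by omega)
    rw [h1, h2,
      getD_append_right _ _ _ (by omega), hlo,
      getD_zipWith _ _ _ _ (by omega) (by omega)]

theorem pvTransform_length (op : Int → Int → Int) (l n : Nat) (A : List Int) :
    ((List.range l).foldl (fun acc i => pvPass op i n acc) A).length = A.length := by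
  induction l with
  | zero => simp
  | succ m ih =>
    rw [List.range_succ, List.foldl_append]
    simp [List.foldl, pvPass_length, ih]

theorem foldl_pass_split (op : Int → Int → Int) (l : Nat) (L : List Nat)
    (hL : ∀ i ∈ L, i < l) :
    ∀ (lo hi' : List Int), lo.length = 2 ^ l → hi'.length = 2 ^ l →
    L.foldl (fun acc i => pvPass op i (2 ^ (l + 1)) acc) (lo ++ hi') =
      L.foldl (fun acc i => pvPass op i (2 ^ l) acc) lo ++
      L.foldl (fun acc i => pvPass op i (2 ^ l) acc) hi' := by
  induction L with
  | nil => intro lo hi' _ _; rfl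
  | cons i L ih =>
    intro lo hi' hlo hhi
    simp only [List.foldl]
    rw [pass_split op (hL i (by simp)) lo hi' hlo hhi]
    exact ih (fun x hx => hL x (by simp [hx])) _ _
      (by rw [pvPass_length, hlo]) (by rw [pvPass_length, hhi])

theorem transform_eq_rec (op : Int → Int → Int) (l : Nat) (A : List Int)
    (hA : A.length = 2 ^ l) : pvTransform op l (2 ^ l) A = pvRec op A := by
  induction l generalizing A with
  | zero =>
    rw [pvRec]
    simp [pvTransform, hA]
  | succ m ih =>
    have h2 : (2 : Nat) ≤ 2 ^ (m + 1) := by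
      calc (2:Nat) = 2 ^ 1 := rfl
      _ ≤ 2 ^ (m + 1) := Nat.pow_le_pow_right (by norm_num) (by omega)
    have hhalf : A.length / 2 = 2 ^ m := by
      rw [hA, pow_succ]; omega
    have hlo : (A.take (A.length / 2)).length = 2 ^ m := by
      simp only [List.length_take, hA, pow_succ_two]; omega
    have hhi : (A.drop (A.length / 2)).length = 2 ^ m := by
      simp only [List.length_drop, hA, pow_succ_two]; omega
    have hsplit : A = A.take (A.length / 2) ++ A.drop (A.length / 2) :=
      (List.take_append_drop _ A).symm
    unfold pvTransform
    rw [List.range_succ, List.foldl_append]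
    simp only [List.foldl]
    conv_lhs => rw [hsplit]
    rw [foldl_pass_split op m (List.range m) (fun i hi => List.mem_range.mp hi) _ _ hlo hhi]
    rw [pass_top op _ _
      (by rw [pvTransform_length]; exact hlo) (by rw [pvTransform_length]; exact hhi)]
    have e1 : (List.range m).foldl (fun acc i => pvPass op i (2 ^ m) acc) (A.take (A.length / 2))
        = pvRec op (A.take (A.length / 2)) := by simpa [pvTransform] using ih _ hlo
    have e2 : (List.range m).foldl (fun acc i => pvPass op i (2 ^ m) acc) (A.drop (A.length / 2))
        = pvRec op (A.drop (A.length / 2)) := by simpa [pvTransform] using ih _ hhi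
    rw [e1, e2]
    conv_rhs => rw [pvRec]
    rw [if_neg (by omega)]

theorem ports_eq (A B : List Int) :
    or_convolution_global_mod A B = or_convolution_global_mod_alt A B := by
  unfold or_convolution_global_mod or_convolution_global_mod_alt
  dsimp only
  set n0 := max A.length B.length with hn0
  set L := if n0 = 0 then 1 else Nat.size (n0 - 1) with hL
  have hbound : n0 ≤ 2 ^ L := by
    by_cases h : n0 = 0
    · rw [hL, if_pos h, h]; norm_num
    · rw [hL, if_neg h]
      have := Nat.lt_size_self (n0 - 1)
      omega
  have hsh : (1 <<< L) = 2 ^ L := by rw [Nat.shiftLeft_eq, one_mul]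
  have hA' : (A ++ List.replicate (1 <<< L - A.length) (0 : Int)).length = 2 ^ L := by
    have : A.length ≤ n0 := Nat.le_max_left _ _
    simp only [List.length_append, List.length_replicate, hsh]
    omega
  have hB' : (B ++ List.replicate (1 <<< L - B.length) (0 : Int)).length = 2 ^ L := by
    have : B.length ≤ n0 := Nat.le_max_right _ _
    simp only [List.length_append, List.length_replicate, hsh]
    omega
  rw [hsh]
  rw [hsh] at hA' hB'
  rw [transform_eq_rec _ L _ hA', transform_eq_rec _ L _ hB']
  have hRecLenA : (pvRec (· + ·) (A ++ List.replicate (2 ^ L - A.length) (0 : Int))).length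
      = 2 ^ L := by
    rw [← transform_eq_rec _ L _ hA']
    unfold pvTransform
    rw [pvTransform_length]
    exact hA'
  have hRecLenB : (pvRec (· + ·) (B ++ List.replicate (2 ^ L - B.length) (0 : Int))).length
      = 2 ^ L := by
    rw [← transform_eq_rec _ L _ hB']
    unfold pvTransform
    rw [pvTransform_length]
    exact hB'
  have hC : (List.zipWith (fun a b => a * b % pvMOD)
      (pvRec (· + ·) (A ++ List.replicate (2 ^ L - A.length) (0 : Int)))
      (pvRec (· + ·) (B ++ List.replicate (2 ^ L - B.length) (0 : Int)))).length = 2 ^ L := by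
    rw [List.length_zipWith, hRecLenA, hRecLenB, Nat.min_self]
  exact transform_eq_rec _ L _ hC

-- ===== VERDICT (by name: the statement is the Claim_ definition above) =====
theorem or_convolution_global_mod_spec : Claim_equal_or_convolution_global_mod := by
  intro A B _
  unfold Spec_or_convolution_global_mod
  exact ports_eq A B
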